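-- pv_equiv track=rewrite | github.com/bhupendersinghh/trellis | trellisclustering2.py | get_url_type
-- ===== SOURCE A (Python) =====
-- def get_url_type(url_sub_type):
--    url_types = {}
--
--    url_types['discussion'] = [
--        'discussions-about', 'group-discussions', 'discussions', 'discussions-reply',
--        'createDiscussions'
--    ]
--    url_types['group'] = [
--        'group-home', 'myGroups', 'group-about', 'group-news', 'pendingGroups', 'group-related',
--        'discoverGroups', 'group-create-request', 'group-analytics', 'createGroupStep1',
--        'createGroupStep2', 'createGroupStep3', 'createGroupStep4', 'group-external-drive',
--        'group-template'
--    ]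
--    url_types['announcement'] = [
--        'announcement-detail', 'group-announcement', 'announcement-reply', 'edit-announcement'
--    ]
--    url_types['document'] = [
--        'document-reader', 'group-library', 'document-detail', 'library', 'reviewDocs','document-uploads'
--    ]
--    url_types['profile_view'] = ['profile', 'group-admin-members']
--    url_types['event'] = ['event-detail', 'group-events', 'events', 'event-entry']
--    url_types['notification'] = ['notification', 'content-notification', 'group-notification','main-home', 'site-home']
--    url_types['profile_edit'] = ['profile-edit', 'email-notification', 'manageAccount']
--    url_types['registration'] = ['betaRegistration']
--    url_types['search'] = ['search']
--    url_types['status'] = ['status', 'create-status', 'status-reply']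
--    url_types['connection'] = ['connections', 'pendingConnections']
--
--
--    for url_type, sub_types in url_types.items():
--        if url_sub_type in sub_types:
--            return url_type
-- ===== SOURCE B (Python) =====
-- # B: one flat reverse-lookup dict (sub_type -> category) built as a literal;
-- # the category loop and per-list membership scan disappear into a single dict lookup.
-- _URL_TYPE_BY_SUB = {
--     'discussions-about': 'discussion',
--     'group-discussions': 'discussion',
--     'discussions': 'discussion',
--     'discussions-reply': 'discussion',
--     'createDiscussions': 'discussion',
--     'group-home': 'group',
--     'myGroups': 'group',
--     'group-about': 'group',
--     'group-news': 'group',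
--     'pendingGroups': 'group',
--     'group-related': 'group',
--     'discoverGroups': 'group',
--     'group-create-request': 'group',
--     'group-analytics': 'group',
--     'createGroupStep1': 'group',
--     'createGroupStep2': 'group',
--     'createGroupStep3': 'group',
--     'createGroupStep4': 'group',
--     'group-external-drive': 'group',
--     'group-template': 'group',
--     'announcement-detail': 'announcement',
--     'group-announcement': 'announcement',
--     'announcement-reply': 'announcement',
--     'edit-announcement': 'announcement',
--     'document-reader': 'document',
--     'group-library': 'document',
--     'document-detail': 'document',
--     'library': 'document',
--     'reviewDocs': 'document',
--     'document-uploads': 'document',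
--     'profile': 'profile_view',
--     'group-admin-members': 'profile_view',
--     'event-detail': 'event',
--     'group-events': 'event',
--     'events': 'event',
--     'event-entry': 'event',
--     'notification': 'notification',
--     'content-notification': 'notification',
--     'group-notification': 'notification',
--     'main-home': 'notification',
--     'site-home': 'notification',
--     'profile-edit': 'profile_edit',
--     'email-notification': 'profile_edit',
--     'manageAccount': 'profile_edit',
--     'betaRegistration': 'registration',
--     'search': 'search',
--     'status': 'status',
--     'create-status': 'status',
--     'status-reply': 'status',
--     'connections': 'connection',
--     'pendingConnections': 'connection',
-- }
--
-- def get_url_type(url_sub_type):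
--     return _URL_TYPE_BY_SUB.get(url_sub_type)
-- ===== Notes on version B (the rewrite author's own statement) =====
-- stated objective: idiomatic
-- what changed: Replaced the category loop with a per-list membership scan by a single precomputed flat reverse-lookup dict (sub_type -> category) and one dict.get lookup; the loop over categories is gone.
import Mathlib
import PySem

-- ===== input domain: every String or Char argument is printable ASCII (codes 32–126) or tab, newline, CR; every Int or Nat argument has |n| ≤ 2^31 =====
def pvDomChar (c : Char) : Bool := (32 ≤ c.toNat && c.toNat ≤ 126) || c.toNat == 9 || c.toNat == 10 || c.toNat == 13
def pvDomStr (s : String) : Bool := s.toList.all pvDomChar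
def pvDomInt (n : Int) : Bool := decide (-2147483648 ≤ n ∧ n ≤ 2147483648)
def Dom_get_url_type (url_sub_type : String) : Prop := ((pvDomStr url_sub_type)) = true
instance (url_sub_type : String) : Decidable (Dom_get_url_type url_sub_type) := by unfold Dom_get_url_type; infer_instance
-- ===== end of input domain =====

-- B replaces A's category loop + per-list membership scan with a single flat
-- reverse-lookup dict (sub_type -> category) and one lookup: idiomatic, not faster.

-- ===== PORT A =====
-- the 'for url_type, sub_types in url_types.items(): if url_sub_type in sub_types: return url_type' loop
def pvScanA (s : String) : List (String × List String) → Option String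
  | [] => none
  | (t, subs) :: rest => if subs.contains s then some t else pvScanA s rest

def get_url_type (url_sub_type : String) : Option String :=
  let url_types : PySem.Dict String (List String) := PySem.Dict.empty
  let url_types := url_types.insert "discussion"
    ["discussions-about", "group-discussions", "discussions", "discussions-reply",
     "createDiscussions"]
  let url_types := url_types.insert "group"
    ["group-home", "myGroups", "group-about", "group-news", "pendingGroups", "group-related",
     "discoverGroups", "group-create-request", "group-analytics", "createGroupStep1",
     "createGroupStep2", "createGroupStep3", "createGroupStep4", "group-external-drive",
     "group-template"]
  let url_types := url_types.insert "announcement"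
    ["announcement-detail", "group-announcement", "announcement-reply", "edit-announcement"]
  let url_types := url_types.insert "document"
    ["document-reader", "group-library", "document-detail", "library", "reviewDocs", "document-uploads"]
  let url_types := url_types.insert "profile_view" ["profile", "group-admin-members"]
  let url_types := url_types.insert "event" ["event-detail", "group-events", "events", "event-entry"]
  let url_types := url_types.insert "notification"
    ["notification", "content-notification", "group-notification", "main-home", "site-home"]
  let url_types := url_types.insert "profile_edit" ["profile-edit", "email-notification", "manageAccount"]
  let url_types := url_types.insert "registration" ["betaRegistration"]
  let url_types := url_types.insert "search" ["search"]
  let url_types := url_types.insert "status" ["status", "create-status", "status-reply"]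
  let url_types := url_types.insert "connection" ["connections", "pendingConnections"]
  pvScanA url_sub_type url_types.items

-- ===== PORT B =====
-- _URL_TYPE_BY_SUB: the flat literal reverse-lookup dict of Source B
def pvUrlTypeBySub : PySem.Dict String String := PySem.Dict.ofList [
  ("discussions-about", "discussion"),
  ("group-discussions", "discussion"),
  ("discussions", "discussion"),
  ("discussions-reply", "discussion"),
  ("createDiscussions", "discussion"),
  ("group-home", "group"),
  ("myGroups", "group"),
  ("group-about", "group"),
  ("group-news", "group"),
  ("pendingGroups", "group"),
  ("group-related", "group"),
  ("discoverGroups", "group"),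
  ("group-create-request", "group"),
  ("group-analytics", "group"),
  ("createGroupStep1", "group"),
  ("createGroupStep2", "group"),
  ("createGroupStep3", "group"),
  ("createGroupStep4", "group"),
  ("group-external-drive", "group"),
  ("group-template", "group"),
  ("announcement-detail", "announcement"),
  ("group-announcement", "announcement"),
  ("announcement-reply", "announcement"),
  ("edit-announcement", "announcement"),
  ("document-reader", "document"),
  ("group-library", "document"),
  ("document-detail", "document"),
  ("library", "document"),
  ("reviewDocs", "document"),
  ("document-uploads", "document"),
  ("profile", "profile_view"),
  ("group-admin-members", "profile_view"),
  ("event-detail", "event"),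
  ("group-events", "event"),
  ("events", "event"),
  ("event-entry", "event"),
  ("notification", "notification"),
  ("content-notification", "notification"),
  ("group-notification", "notification"),
  ("main-home", "notification"),
  ("site-home", "notification"),
  ("profile-edit", "profile_edit"),
  ("email-notification", "profile_edit"),
  ("manageAccount", "profile_edit"),
  ("betaRegistration", "registration"),
  ("search", "search"),
  ("status", "status"),
  ("create-status", "status"),
  ("status-reply", "status"),
  ("connections", "connection"),
  ("pendingConnections", "connection")
]

def get_url_type_alt (url_sub_type : String) : Option String :=
  pvUrlTypeBySub.get? url_sub_type

-- ===== PRECONDITION & SPEC =====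
def Spec_get_url_type (url_sub_type : String) (out : Option String) : Prop := out = get_url_type_alt url_sub_type
instance (url_sub_type : String) (out : Option String) : Decidable (Spec_get_url_type url_sub_type out) := by unfold Spec_get_url_type; infer_instance

-- ===== CLAIM (what is proved, stated in full; the proofs are below) =====
def Claim_equal_get_url_type : Prop := ∀ (url_sub_type : String), Dom_get_url_type url_sub_type → Spec_get_url_type url_sub_type (get_url_type url_sub_type)

-- ===== LEMMAS AND PROOFS =====

-- flatten a category table into (sub_type, category) pairs, in order
def pvFlatten (t : List (String × List String)) : List (String × String) :=
  t.foldr (fun p acc => p.2.map (fun x => (x, p.1)) ++ acc) []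

theorem pv_get?_mk_map_append (s cat : String) (subs : List String) (rest : List (String × String)) :
    (PySem.Dict.mk (subs.map (fun x => (x, cat)) ++ rest)).get? s =
    if subs.contains s then some cat else (PySem.Dict.mk rest).get? s := by
  induction subs with
  | nil => simp
  | cons a l ih =>
    simp only [List.map_cons, List.cons_append, PySem.Dict.get?_mk_cons, ih, List.contains_cons]
    rcases eq_or_ne a s with h | h
    · subst h; simp
    · simp [h, Ne.symm h]

theorem pv_scan_eq (s : String) (t : List (String × List String)) :
    pvScanA s t = (PySem.Dict.mk (pvFlatten t)).get? s := by
  induction t with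
  | nil => simp [pvScanA, pvFlatten, PySem.Dict.get?]
  | cons p rest ih =>
    obtain ⟨c, subs⟩ := p
    simp only [pvScanA, pvFlatten, List.foldr_cons, pv_get?_mk_map_append]
    rw [ih]; rfl

-- ===== VERDICT (by name: the statement is the Claim_ definition above) =====
set_option maxRecDepth 100000 in
theorem get_url_type_spec : Claim_equal_get_url_type := by
  intro s _
  simp only [Spec_get_url_type, get_url_type, get_url_type_alt]
  rw [pv_scan_eq]
  congr 1
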